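-- pv_equiv track=rewrite | github.com/MRDYH0410/supply-chain-reconfiguration | experiments_1/sensitivity_runner.py | _mode_or_median_int
-- ===== SOURCE A (Python) =====
-- from collections import Counter
-- from typing import Any, Dict, List, Optional, Tuple
--
-- def _mode_or_median_int(values: List[int]) -> int:
--     if not values:
--         raise ValueError("empty integer list")
--     counts = Counter(int(v) for v in values)
--     best_count = max(counts.values())
--     best_vals = sorted(v for v, c in counts.items() if c == best_count)
--     if len(best_vals) == 1:
--         return int(best_vals[0])
--     vals_sorted = sorted(int(v) for v in values)
--     return int(vals_sorted[(len(vals_sorted) - 1) // 2])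
-- ===== SOURCE B (Python) =====
-- def _mode_or_median_int(values):
--     if not values:
--         raise ValueError("empty integer list")
--     s = sorted(int(v) for v in values)
--     n = len(s)
--     best_count = 0
--     num_best = 0
--     best_val = 0
--     i = 0
--     while i < n:
--         j = i
--         while j < n and s[j] == s[i]:
--             j += 1
--         run = j - i
--         if run > best_count:
--             best_count, num_best, best_val = run, 1, s[i]
--         elif run == best_count:
--             num_best += 1
--         i = j
--     if num_best == 1:
--         return best_val
--     return s[(n - 1) // 2]
-- ===== Notes on version B (the rewrite author's own statement) =====
-- stated objective: alternative
-- what changed: Replaced the Counter hash table plus max plus sorted-modes pipeline by a single sort followed by one linear run-scan that tracks the maximum run length, how many distinct values attain it, and the first such value; the lower median comes from the same sorted list.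
import Mathlib
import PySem

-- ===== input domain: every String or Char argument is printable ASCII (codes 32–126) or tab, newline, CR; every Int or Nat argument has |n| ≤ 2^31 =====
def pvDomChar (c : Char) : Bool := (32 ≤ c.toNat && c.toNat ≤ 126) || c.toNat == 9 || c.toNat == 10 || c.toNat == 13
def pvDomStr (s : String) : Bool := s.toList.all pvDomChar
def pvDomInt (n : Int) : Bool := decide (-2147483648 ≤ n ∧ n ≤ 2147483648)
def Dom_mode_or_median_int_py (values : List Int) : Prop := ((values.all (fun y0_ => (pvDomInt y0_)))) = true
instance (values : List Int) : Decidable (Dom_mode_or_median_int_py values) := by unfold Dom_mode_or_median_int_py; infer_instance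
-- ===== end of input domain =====

-- B replaces A's Counter + max + sorted-modes pipeline by one sort followed by a single run-scan over the sorted list (alternative algorithm, same asymptotic cost; return value only).


-- ===== PORT A =====
-- counts = Counter(values); best_count = max(counts.values());
-- best_vals = sorted(v for v, c in counts.items() if c == best_count);
-- if exactly one mode return it, else return sorted(values)[(n-1)//2].
-- On the empty list Python raises ValueError before reaching max; excluded by Pre_.
def mode_or_median_int_py (values : List Int) : Int :=
  let counts := PySem.Dict.counter values
  let best_count := (PySem.List.max? counts.values (fun x => x)).getD 0
  let best_vals := PySem.List.sorted
      ((counts.items.filter (fun p => p.2 == best_count)).map (fun p => p.1)) (fun x => x) false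
  if best_vals.length = 1 then
    PySem.List.pyGetD best_vals 0 0
  else
    let vals_sorted := PySem.List.sorted values (fun x => x) false
    PySem.List.pyGetD vals_sorted (PySem.Int.floordiv (PySem.List.len vals_sorted - 1) 2) 0

-- ===== PORT B =====
-- The run-scan of Source B over the sorted list: each altScan step consumes one maximal
-- run (Source B's inner while-j loop), updating (best_count, num_best, best_val).
def altScan (s : List Int) (best num : Nat) (bv : Int) : Nat × Nat × Int :=
  match s with
  | [] => (best, num, bv)
  | x :: rest =>
    let run := (rest.takeWhile (fun y => y == x)).length + 1
    let rest' := rest.dropWhile (fun y => y == x)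
    if best < run then altScan rest' run 1 x
    else if run = best then altScan rest' best (num + 1) bv
    else altScan rest' best num bv
termination_by s.length
decreasing_by
  all_goals
    simp only [List.length_cons]
    exact Nat.lt_succ_of_le (List.length_dropWhile_le _ _)


-- B raises ValueError on the empty list just like A (excluded by Pre_); the port returns 0 there.
def mode_or_median_int_py_alt (values : List Int) : Int :=
  if values = [] then 0
  else
    let s := PySem.List.sorted values (fun x => x) false
    let r := altScan s 0 0 0
    if r.2.1 = 1 then r.2.2
    else PySem.List.pyGetD s (PySem.Int.floordiv ((s.length : Int) - 1) 2) 0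

-- ===== PRECONDITION & SPEC =====
-- Pre_ excludes exactly the empty list, on which both A and B raise ValueError.
def Pre_mode_or_median_int_py (values : List Int) : Prop := values ≠ []
instance (values : List Int) : Decidable (Pre_mode_or_median_int_py values) := by
  unfold Pre_mode_or_median_int_py; infer_instance
def pvWitness_mode_or_median_int_py : List Int := [3, 1, 3]

def Spec_mode_or_median_int_py (values : List Int) (out : Int) : Prop := out = mode_or_median_int_py_alt values
instance (values : List Int) (out : Int) : Decidable (Spec_mode_or_median_int_py values out) := by unfold Spec_mode_or_median_int_py; infer_instance

-- ===== CLAIM (what is proved, stated in full; the proofs are below) =====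
def Claim_equal_mode_or_median_int_py : Prop := ∀ (values : List Int), Dom_mode_or_median_int_py values → Pre_mode_or_median_int_py values → Spec_mode_or_median_int_py values (mode_or_median_int_py values)

-- ===== LEMMAS AND PROOFS =====

-- dFold: the run-scan specialised to the list of distinct values, each run replaced by its length.
def dFold (cnt : Int → Nat) (D : List Int) (b n : Nat) (v : Int) : Nat × Nat × Int :=
  match D with
  | [] => (b, n, v)
  | d :: ds =>
    if b < cnt d then dFold cnt ds (cnt d) 1 d
    else if cnt d = b then dFold cnt ds b (n + 1) v
    else dFold cnt ds b n v

theorem takeWhile_replicate_append (k : Nat) (d : Int) (rest : List Int)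
    (h : rest.takeWhile (fun y => y == d) = []) :
    (List.replicate k d ++ rest).takeWhile (fun y => y == d) = List.replicate k d := by
  induction k with
  | zero => simpa using h
  | succ k ih => simp [List.replicate_succ, ih]

theorem dropWhile_replicate_append (k : Nat) (d : Int) (rest : List Int)
    (h : rest.takeWhile (fun y => y == d) = []) :
    (List.replicate k d ++ rest).dropWhile (fun y => y == d) = rest := by
  induction k with
  | zero => simpa [List.dropWhile_eq_self_iff] using congrArg List.head? h
  | succ k ih => simp [List.replicate_succ, ih]

theorem takeWhile_eq_nil_of_gt (d : Int) (rest : List Int) (h : ∀ y ∈ rest, d < y) :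
    rest.takeWhile (fun y => y == d) = [] := by
  cases rest with
  | nil => rfl
  | cons y t =>
    have := h y (by simp)
    simp [show ¬(y == d) = true by simp; omega]

theorem altScan_block (c : Nat) (hc : 0 < c) (d : Int) (rest : List Int)
    (h : rest.takeWhile (fun y => y == d) = []) (b n : Nat) (v : Int) :
    altScan (List.replicate c d ++ rest) b n v =
      (if b < c then altScan rest c 1 d
       else if c = b then altScan rest b (n + 1) v
       else altScan rest b n v) := by
  obtain ⟨k, rfl⟩ : ∃ k, c = k + 1 := ⟨c - 1, by omega⟩
  rw [show List.replicate (k+1) d ++ rest = d :: (List.replicate k d ++ rest) by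
    simp [List.replicate_succ]]
  rw [altScan]
  simp only [takeWhile_replicate_append k d rest h, dropWhile_replicate_append k d rest h,
    List.length_replicate]

theorem altScan_flatMap (cnt : Int → Nat) (D : List Int)
    (hpos : ∀ d ∈ D, 0 < cnt d) (hlt : D.Pairwise (· < ·)) (b n : Nat) (v : Int) :
    altScan (D.flatMap (fun d => List.replicate (cnt d) d)) b n v = dFold cnt D b n v := by
  induction D generalizing b n v with
  | nil => simp [altScan, dFold]
  | cons d ds ih =>
    have hlt' := (List.pairwise_cons.mp hlt).1
    have hrest : (ds.flatMap (fun d => List.replicate (cnt d) d)).takeWhile (fun y => y == d) = [] := by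
      apply takeWhile_eq_nil_of_gt
      intro y hy
      simp only [List.mem_flatMap, List.mem_replicate] at hy
      obtain ⟨e, he, _, hye⟩ := hy
      exact hye ▸ hlt' e he
    rw [List.flatMap_cons, altScan_block (cnt d) (hpos d (by simp)) d _ hrest]
    have hpos' : ∀ d' ∈ ds, 0 < cnt d' := fun d' h' => hpos d' (by simp [h'])
    have hlt'' := (List.pairwise_cons.mp hlt).2
    rw [dFold]
    split_ifs <;> rw [ih hpos' hlt'']

def Mx (cnt : Int → Nat) (D : List Int) : Nat := D.foldl (fun a d => max a (cnt d)) 0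

theorem foldl_max_eq (cnt : Int → Nat) (D : List Int) (b : Nat) :
    D.foldl (fun a d => max a (cnt d)) b = max b (Mx cnt D) := by
  induction D generalizing b with
  | nil =>
    have h0 : Mx cnt [] = 0 := rfl
    rw [h0]
    simp
  | cons d ds ih =>
    have h0 : Mx cnt (d :: ds) = ds.foldl (fun a e => max a (cnt e)) (max 0 (cnt d)) := rfl
    rw [h0, List.foldl_cons, ih (max b (cnt d)), ih (max 0 (cnt d))]
    omega

theorem dFold_char (cnt : Int → Nat) (D : List Int) (b n : Nat) (v : Int) :
    dFold cnt D b n v =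
      if b < max b (Mx cnt D) then
        (max b (Mx cnt D),
         (D.filter (fun d => cnt d == max b (Mx cnt D))).length,
         (D.filter (fun d => cnt d == max b (Mx cnt D))).headD 0)
      else (b, n + (D.filter (fun d => cnt d == b)).length, v) := by
  induction D generalizing b n v with
  | nil =>
    rw [dFold]
    have h0 : Mx cnt [] = 0 := rfl
    rw [h0]
    simp
  | cons d ds ih =>
    have hM : Mx cnt (d :: ds) = max (cnt d) (Mx cnt ds) := by
      have h0 : Mx cnt (d :: ds) = ds.foldl (fun a e => max a (cnt e)) (max 0 (cnt d)) := rfl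
      rw [h0, foldl_max_eq]
      omega
    rw [dFold, hM]
    by_cases h1 : b < cnt d
    · rw [if_pos h1, ih (cnt d) 1 d]
      by_cases hc : cnt d < Mx cnt ds
      · have e0 : max (cnt d) (Mx cnt ds) = Mx cnt ds := by omega
        rw [e0]
        have e2 : max b (Mx cnt ds) = Mx cnt ds := by omega
        rw [e2, if_pos hc, if_pos (show b < Mx cnt ds by omega), List.filter_cons,
          if_neg (by simp; omega)]
      · have e0 : max (cnt d) (Mx cnt ds) = cnt d := by omega
        rw [e0]
        have e2 : max b (cnt d) = cnt d := by omega
        rw [e2, if_neg (lt_irrefl (cnt d)), if_pos h1, List.filter_cons, if_pos (by simp)]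
        simp [Nat.add_comm]
    · rw [if_neg h1]
      by_cases h2 : cnt d = b
      · rw [if_pos h2, ih b (n + 1) v]
        have e2 : max b (max (cnt d) (Mx cnt ds)) = max b (Mx cnt ds) := by omega
        rw [e2]
        by_cases hlt : b < max b (Mx cnt ds)
        · rw [if_pos hlt, if_pos hlt, List.filter_cons, if_neg (by simp; omega)]
        · rw [if_neg hlt, if_neg hlt, List.filter_cons, if_pos (by simp [h2])]
          simp [Prod.ext_iff]
          omega
      · rw [if_neg h2, ih b n v]
        have e2 : max b (max (cnt d) (Mx cnt ds)) = max b (Mx cnt ds) := by omega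
        rw [e2]
        by_cases hlt : b < max b (Mx cnt ds)
        · rw [if_pos hlt, if_pos hlt, List.filter_cons, if_neg (by simp; omega)]
        · rw [if_neg hlt, if_neg hlt, List.filter_cons, if_neg (by simp; omega)]

theorem count_flatMap_replicate (cnt : Int → Nat) (D : List Int) (hnd : D.Nodup) (v : Int) :
    (D.flatMap (fun d => List.replicate (cnt d) d)).count v = if v ∈ D then cnt v else 0 := by
  induction D with
  | nil => simp
  | cons d ds ih =>
    have hnd' := (List.nodup_cons.mp hnd).2
    have hd : d ∉ ds := (List.nodup_cons.mp hnd).1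
    rw [List.flatMap_cons, List.count_append, ih hnd']
    by_cases hv : v = d
    · subst hv
      simp [hd]
    · simp [List.count_replicate, hv, Ne.symm hv]

theorem pairwise_flatMap_replicate (cnt : Int → Nat) (D : List Int) (h : D.Pairwise (· < ·)) :
    (D.flatMap (fun d => List.replicate (cnt d) d)).Pairwise (· ≤ ·) := by
  induction D with
  | nil => simp
  | cons d ds ih =>
    have h' := (List.pairwise_cons.mp h).2
    have hlt := (List.pairwise_cons.mp h).1
    rw [List.flatMap_cons, List.pairwise_append]
    refine ⟨List.pairwise_replicate.mpr (by simp), ih h', ?_⟩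
    intro a ha b hb
    rw [List.mem_replicate] at ha
    simp only [List.mem_flatMap, List.mem_replicate] at hb
    obtain ⟨e, he, _, hbe⟩ := hb
    exact ha.2 ▸ hbe ▸ le_of_lt (hlt e he)

theorem Mx_attained (cnt : Int → Nat) (D : List Int) (hne : D ≠ []) :
    ∃ d ∈ D, Mx cnt D = cnt d := by
  induction D with
  | nil => exact absurd rfl hne
  | cons d ds ih =>
    have hM : Mx cnt (d :: ds) = max (cnt d) (Mx cnt ds) := by
      have h0 : Mx cnt (d :: ds) = ds.foldl (fun a e => max a (cnt e)) (max 0 (cnt d)) := rfl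
      rw [h0, foldl_max_eq]
      omega
    rcases ds with _ | ⟨e, es⟩
    · exact ⟨d, by simp, by rw [hM]; have : Mx cnt [] = 0 := rfl; rw [this]; omega⟩
    · obtain ⟨x, hx, hMx⟩ := ih (by simp)
      by_cases hc : cnt x ≤ cnt d
      · exact ⟨d, by simp, by rw [hM, hMx]; omega⟩
      · exact ⟨x, by simp [hx], by rw [hM, hMx]; omega⟩

theorem le_Mx (cnt : Int → Nat) (D : List Int) (d : Int) (hd : d ∈ D) : cnt d ≤ Mx cnt D := by
  induction D with
  | nil => simp at hd
  | cons e es ih =>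
    have hM : Mx cnt (e :: es) = max (cnt e) (Mx cnt es) := by
      have h0 : Mx cnt (e :: es) = es.foldl (fun a x => max a (cnt x)) (max 0 (cnt e)) := rfl
      rw [h0, foldl_max_eq]
      omega
    rw [hM]
    rcases List.mem_cons.mp hd with h | h
    · subst h; omega
    · have := ih h; omega


def pvD (values : List Int) : List Int :=
  PySem.List.sorted (PySem.Set.ofList values) (fun x => x) false

theorem pvD_nodup (values : List Int) : (pvD values).Nodup :=
  (PySem.List.sorted_ofList_pairwise_lt values).imp (fun h => ne_of_lt h)

theorem mem_pvD (values : List Int) (v : Int) : v ∈ pvD values ↔ v ∈ values := by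
  rw [pvD, PySem.List.mem_sorted, PySem.Set.mem_ofList]

theorem sorted_eq_flat (values : List Int) :
    PySem.List.sorted values (fun x => x) false =
      (pvD values).flatMap (fun d => List.replicate (values.count d) d) := by
  apply PySem.List.sorted_id_eq_of_perm_of_pairwise
  · rw [List.perm_iff_count]
    intro v
    rw [count_flatMap_replicate _ _ (pvD_nodup values) v]
    by_cases hv : v ∈ pvD values
    · simp [hv]
    · rw [if_neg hv]
      exact (List.count_eq_zero.mpr (fun h => hv ((mem_pvD values v).mpr h))).symm
  · exact pairwise_flatMap_replicate _ _ (PySem.List.sorted_ofList_pairwise_lt values)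

theorem main_thm (values : List Int) (hne : values ≠ []) :
    mode_or_median_int_py values = mode_or_median_int_py_alt values := by
  -- notation
  set D := pvD values with hD
  have hDne : D ≠ [] := by
    rw [hD, pvD, Ne, PySem.List.sorted_eq_nil_iff]
    cases values with
    | nil => exact absurd rfl hne
    | cons x xs => intro h; have := (PySem.Set.mem_ofList (x :: xs) x).mpr (by simp); simp [h] at this
  have hpos : ∀ d ∈ D, 0 < values.count d := by
    intro d hd
    exact List.count_pos_iff.mpr ((mem_pvD values d).mp hd)
  have hMpos : 0 < Mx (fun d => values.count d) D := by
    obtain ⟨d, hd, hMd⟩ := Mx_attained (fun d => values.count d) D hDne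
    rw [hMd]; exact hpos d hd
  set cnt : Int → Nat := fun d => values.count d with hcnt
  set Mn := Mx cnt D with hMn
  -- the A side best_count equals (Mn : Int)
  have hvals : (PySem.Dict.counter values).values
      = (PySem.Set.ofList values).map (fun k => ((values.count k : Int))) := by
    have h0 : (PySem.Dict.counter values).values
        = ((PySem.Dict.counter values).items).map (fun p => p.2) := rfl
    rw [h0, PySem.Dict.items_counter, List.map_map]
    rfl
  have hbc : (PySem.List.max? (PySem.Dict.counter values).values (fun x => x)).getD 0 = (Mn : Int) := by
    obtain ⟨m, hm⟩ : ∃ m, PySem.List.max? (PySem.Dict.counter values).values (fun x => x) = some m := by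
      cases h : PySem.List.max? (PySem.Dict.counter values).values (fun x => x) with
      | none =>
        exfalso
        rw [PySem.List.max?_eq_none_iff] at h
        rw [hvals] at h
        rcases values with _ | ⟨x, xs⟩
        · exact hne rfl
        · have := (PySem.Set.mem_ofList (x :: xs) x).mpr (by simp)
          simp [List.map_eq_nil_iff] at h
          simp [h] at this
      | some m => exact ⟨m, rfl⟩
    rw [hm]
    have hmem := PySem.List.max?_mem hm
    have hmax := PySem.List.max?_isMax hm
    rw [hvals] at hmem hmax
    simp only [List.mem_map] at hmem
    obtain ⟨k, hk, hkm⟩ := hmem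
    -- m = cnt k for k ∈ set; m ≤ Mn since cnt k ≤ Mn; Mn ≤ m since Mn attained
    have hkD : k ∈ D := by rw [hD, pvD, PySem.List.mem_sorted]; exact hk
    have h1 : m ≤ (Mn : Int) := by
      rw [← hkm, hMn]
      exact_mod_cast le_Mx cnt D k hkD
    obtain ⟨d, hd, hMd⟩ := Mx_attained cnt D hDne
    have hdset : d ∈ PySem.Set.ofList values := by
      rw [← PySem.List.mem_sorted (PySem.Set.ofList values) (fun x => x) false d]
      exact hd
    have h2 : (Mn : Int) ≤ m := by
      have := hmax ((values.count d : Int)) (List.mem_map.mpr ⟨d, hdset, rfl⟩)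
      simpa [hMn, hMd] using this
    simp
    omega
  -- the A side best_vals equals D.filter (cnt = Mn)
  have hbv : PySem.List.sorted
      (((PySem.Dict.counter values).items.filter (fun p => p.2 == (Mn : Int))).map (fun p => p.1))
      (fun x => x) false
      = D.filter (fun d => values.count d == Mn) := by
    rw [PySem.Dict.items_counter, List.filter_map]
    have hp : ((fun p : Int × Int => p.2 == (Mn : Int)) ∘ (fun k => (k, ((values.count k : Int)))))
        = fun k => values.count k == Mn := by
      funext k
      simp [Function.comp]
    rw [hp, List.map_map]
    have : ((fun p : Int × Int => p.1) ∘ (fun k => (k, ((values.count k : Int))))) = id := rfl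
    rw [this, List.map_id]
    apply PySem.List.sorted_eq_of_perm_of_pairwise_lt
    · exact ((PySem.List.sorted_perm (PySem.Set.ofList values) (fun x => x) false).filter _)
    · exact (PySem.List.sorted_ofList_pairwise_lt values).filter _
  -- the B side scan
  have hscan : altScan (PySem.List.sorted values (fun x => x) false) 0 0 0
      = (Mn, (D.filter (fun d => values.count d == Mn)).length,
          (D.filter (fun d => values.count d == Mn)).headD 0) := by
    rw [sorted_eq_flat values, ← hD,
      altScan_flatMap cnt D hpos (by rw [hD, pvD]; exact PySem.List.sorted_ofList_pairwise_lt values),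
      dFold_char, if_pos (by omega)]
    have : max 0 Mn = Mn := by omega
    rw [this]
  -- assemble
  rw [mode_or_median_int_py, mode_or_median_int_py_alt, if_neg hne]
  simp only [hbc, hbv, hscan]
  by_cases hlen : (D.filter (fun d => values.count d == Mn)).length = 1
  · rw [if_pos hlen, if_pos hlen]
    rcases hfe : D.filter (fun d => values.count d == Mn) with _ | ⟨x, t⟩
    · rw [hfe] at hlen; simp at hlen
    · rw [hfe] at hlen
      simp at hlen
      subst hlen
      simp [PySem.List.pyGetD_zero]
  · rw [if_neg hlen, if_neg hlen]
    simp [PySem.List.len_eq]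

-- ===== VERDICT (by name: the statement is the Claim_ definition above) =====
theorem mode_or_median_int_py_spec : Claim_equal_mode_or_median_int_py := by
  intro values _ hpre
  exact main_thm values hpre
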